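-- pv_equiv track=rewrite | github.com/fonsecaorg-ux/IsotankClarian | scripts/fix-capa-nowrap.py | find_next_w_tr
-- ===== SOURCE A (Python) =====
-- def is_w_tr_open_at(xml: str, i: int) -> bool:
--     if not xml.startswith("<w:tr", i):
--         return False
--     j = i + len("<w:tr")
--     return j < len(xml) and xml[j] in " >/"
--
-- def find_next_w_tr(xml: str, start: int) -> int:
--     p = start
--     while p < len(xml):
--         j = xml.find("<w:tr", p)
--         if j < 0:
--             return -1
--         if is_w_tr_open_at(xml, j):
--             return j
--         p = j + 5
--     return -1
-- ===== SOURCE B (Python) =====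
-- import re
--
-- _W_TR_OPEN = re.compile(r'<w:tr(?=[ >/])')
--
-- def find_next_w_tr(xml: str, start: int) -> int:
--     # normalise start the way str.find does: negative counts from the end, clamped at 0
--     base = len(xml) + start if start < 0 else start
--     m = _W_TR_OPEN.search(xml, max(base, 0))
--     return m.start() if m else -1
-- ===== Notes on version B (the rewrite author's own statement) =====
-- stated objective: idiomatic
-- what changed: A's explicit while-loop (str.find for the literal, a separate is_w_tr_open_at recheck, manual p=j+5 re-scanning) is replaced by a single compiled-regex search <w:tr(?=[ >/]) from the clamped start position; the lookahead does the followed-by-space/>// check, so the helper and the rescan loop disappear.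
import Mathlib
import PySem

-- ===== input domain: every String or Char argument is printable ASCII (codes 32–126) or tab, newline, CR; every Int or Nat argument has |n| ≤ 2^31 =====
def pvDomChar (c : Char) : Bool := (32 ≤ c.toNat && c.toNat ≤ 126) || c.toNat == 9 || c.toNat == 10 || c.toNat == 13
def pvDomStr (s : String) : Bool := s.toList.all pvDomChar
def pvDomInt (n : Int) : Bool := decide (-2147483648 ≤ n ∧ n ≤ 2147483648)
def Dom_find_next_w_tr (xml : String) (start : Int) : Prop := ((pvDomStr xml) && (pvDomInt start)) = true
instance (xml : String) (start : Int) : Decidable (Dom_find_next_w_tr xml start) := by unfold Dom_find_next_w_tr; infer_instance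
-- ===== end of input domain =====

-- B replaces A's find-loop + is_w_tr_open_at helper by a single left-to-right scan
-- (the contract of re.search(r'<w:tr(?=[ >/])', xml, base)); same return value, no speed claim.

-- ===== PORT A =====
-- is_w_tr_open_at(xml, i): xml.startswith("<w:tr", i) ported via drop (exact for i ≥ 0,
-- the only way A calls it); xml[j] via PySem.List.pyGet?; `xml[j] in " >/"` via Chars.isIn.
def is_w_tr_open_at (l : List Char) (i : Nat) : Bool :=
  if !(PySem.Chars.startswith (l.drop i) ("<w:tr".toList)) then false
  else
    let j := i + ("<w:tr".toList).length
    decide (j < l.length) &&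
      (match PySem.List.pyGet? l (j : Int) with
       | some c => PySem.Chars.isIn [c] (" >/".toList)
       | none => false)

-- the while-loop; after the first iteration p = j + 5 is a natural number
def find_next_w_tr_go (l : List Char) (p : Nat) : Int :=
  if hp : p < l.length then
    let j := PySem.Chars.findFrom l ("<w:tr".toList) (p : Int) none
    if j < 0 then -1
    else if is_w_tr_open_at l j.toNat then j
    else find_next_w_tr_go l (j.toNat + 5)
  else -1
termination_by l.length - p
decreasing_by
  · rename_i hneg hopen
    have hj : j ≠ -1 := by intro h; rw [h] at hneg; exact hneg (by norm_num)
    have hspec := PySem.Chars.findFrom_natCast_spec l ("<w:tr".toList) p (Nat.le_of_lt hp) hj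
    omega

-- find_next_w_tr(xml, start): first loop iteration unrolled because p = start is an Int there
def find_next_w_tr (xml : String) (start : Int) : Int :=
  let l := xml.toList
  if start < (l.length : Int) then
    let j := PySem.Chars.findFrom l ("<w:tr".toList) start none
    if j < 0 then -1
    else if is_w_tr_open_at l j.toNat then j
    else find_next_w_tr_go l (j.toNat + 5)
  else -1

-- ===== PORT B =====
-- a match of the regex <w:tr(?=[ >/]) at position i
def pvMatchAt (l : List Char) (i : Nat) : Bool :=
  ("<w:tr".toList).isPrefixOf (l.drop i) &&
    ((l[i+5]?).elim false (fun c => c == ' ' || c == '>' || c == '/'))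

-- re.search: smallest matching position ≥ i
def pvScan (l : List Char) (i : Nat) : Int :=
  if i < l.length then
    if pvMatchAt l i then (i : Int) else pvScan l (i + 1)
  else -1
termination_by l.length - i

def find_next_w_tr_alt (xml : String) (start : Int) : Int :=
  let l := xml.toList
  let base : Int := if start < 0 then (l.length : Int) + start else start
  pvScan l (max base 0).toNat

-- ===== PRECONDITION & SPEC =====
def Spec_find_next_w_tr (xml : String) (start : Int) (out : Int) : Prop := out = find_next_w_tr_alt xml start
instance (xml : String) (start : Int) (out : Int) : Decidable (Spec_find_next_w_tr xml start out) := by unfold Spec_find_next_w_tr; infer_instance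

-- ===== CLAIM (what is proved, stated in full; the proofs are below) =====
def Claim_equal_find_next_w_tr : Prop := ∀ (xml : String) (start : Int), Dom_find_next_w_tr xml start → Spec_find_next_w_tr xml start (find_next_w_tr xml start)

-- ===== LEMMAS AND PROOFS =====

lemma pv_scan_ge (l : List Char) (p : Nat) (h : l.length ≤ p) : pvScan l p = -1 := by
  rw [pvScan]; simp [Nat.not_lt.mpr h]

lemma pv_scan_stop (l : List Char) (p : Nat) (hp : p < l.length) (hm : pvMatchAt l p = true) :
    pvScan l p = (p : Int) := by
  rw [pvScan]; simp [hp, hm]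

lemma pv_scan_skip (l : List Char) (d p : Nat)
    (hno : ∀ k, p ≤ k → k < p + d → pvMatchAt l k = false) :
    pvScan l p = pvScan l (p + d) := by
  induction d generalizing p with
  | zero => rfl
  | succ d ih =>
    have h1 : pvScan l p = pvScan l (p + 1) := by
      by_cases hp : p < l.length
      · rw [pvScan, if_pos hp, if_neg]
        simp [hno p le_rfl (by omega)]
      · rw [pv_scan_ge l p (by omega), pv_scan_ge l (p+1) (by omega)]
    rw [h1, show p + (d+1) = (p+1) + d by omega]
    exact ih (p+1) (fun k hk hk' => hno k (by omega) (by omega))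

lemma pv_scan_none (l : List Char) (p : Nat)
    (hno : ∀ k, p ≤ k → pvMatchAt l k = false) : pvScan l p = -1 := by
  rw [pv_scan_skip l (l.length - p) p (fun k hk _ => hno k hk), pv_scan_ge]
  omega

lemma pv_singleton_infix (c : Char) (s : List Char) : [c] <:+: s ↔ c ∈ s := by
  constructor
  · rintro ⟨t, u, rfl⟩; simp
  · intro h
    obtain ⟨t, u, rfl⟩ := List.append_of_mem h
    exact ⟨t, u, by simp⟩

lemma pv_open_eq_match (l : List Char) (i : Nat) : is_w_tr_open_at l i = pvMatchAt l i := by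
  rw [is_w_tr_open_at, pvMatchAt]
  have hstr : ("<w:tr".toList) = ['<','w',':','t','r'] := rfl
  have hstr2 : (" >/".toList) = [' ','>','/'] := rfl
  simp only [hstr, hstr2]
  cases hpre : (['<','w',':','t','r']).isPrefixOf (l.drop i) with
  | false =>
    have hnp : ¬ (['<','w',':','t','r']) <+: l.drop i := by
      intro h
      rw [List.isPrefixOf_iff_prefix.mpr h] at hpre
      exact Bool.noConfusion hpre
    have hsw : PySem.Chars.startswith (l.drop i) (['<','w',':','t','r']) = false := by
      cases hb : PySem.Chars.startswith (l.drop i) (['<','w',':','t','r'])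
      · rfl
      · exact absurd ((PySem.Chars.startswith_iff _ _).mp hb) hnp
    simp [hsw]
  | true =>
    have hsw : PySem.Chars.startswith (l.drop i) (['<','w',':','t','r']) = true :=
      (PySem.Chars.startswith_iff _ _).mpr (List.isPrefixOf_iff_prefix.mp hpre)
    simp only [hsw, Bool.not_true, Bool.false_eq_true, if_false, Bool.true_and]
    rw [show ((['<','w',':','t','r'] : List Char)).length = 5 from rfl, show PySem.List.pyGet? l ((i + 5 : Nat) : Int) = l[i+5]? from PySem.List.pyGet?_natCast l (i+5)]
    cases hg : l[i+5]? with
    | none =>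
      have : ¬ i + 5 < l.length := by
        intro h; rw [List.getElem?_eq_getElem h] at hg; simp at hg
      simp [this]
    | some c =>
      have hlt : i + 5 < l.length := by
        by_contra h
        rw [List.getElem?_eq_none (by omega)] at hg; simp at hg
      simp only [hlt, decide_true, Bool.true_and, Option.elim]
      cases hin : PySem.Chars.isIn [c] ([' ','>','/']) with
      | true =>
        have := (pv_singleton_infix c ([' ','>','/'])).mp ((PySem.Chars.isIn_iff_infix _ _).mp hin)
        simp at this
        rcases this with h|h|h <;> simp [h]
      | false =>
        have := (PySem.Chars.isIn_eq_false_iff _ _).mp hin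
        rw [pv_singleton_infix] at this
        simp at this
        obtain ⟨h1, h2, h3⟩ := this
        simp [h1, h2, h3]

lemma pv_match_prefix (l : List Char) (k : Nat) (h : pvMatchAt l k = true) :
    ("<w:tr".toList) <+: l.drop k := by
  rw [pvMatchAt] at h
  exact List.isPrefixOf_iff_prefix.mp (Bool.and_elim_left h)

lemma pv_prefix_lt (l : List Char) (j : Nat) (h : ("<w:tr".toList) <+: l.drop j) :
    j < l.length := by
  have := h.length_le
  simp at this
  omega

lemma pv_block (l : List Char) (j : Nat) (h : ("<w:tr".toList) <+: l.drop j)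
    (d : Nat) (h1 : 1 ≤ d) (h4 : d ≤ 4) : pvMatchAt l (j + d) = false := by
  obtain ⟨t, ht⟩ := h
  have hd : l.drop (j + d) = ('<'::'w'::':'::'t'::'r'::t).drop d := by
    rw [← List.drop_drop, ← ht]; rfl
  have hnp : (("<w:tr".toList).isPrefixOf (l.drop (j + d))) = false := by
    rw [hd]
    interval_cases d <;> simp [List.isPrefixOf]
  rw [pvMatchAt, hnp]
  rfl

lemma pv_infix_iff (sub l : List Char) (p : Nat) :
    sub <:+: l.drop p ↔ ∃ k, p ≤ k ∧ sub <+: l.drop k := by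
  constructor
  · intro h
    have := (PySem.Chars.exists_prefix_drop_iff_isIn sub (l.drop p)).mpr
      ((PySem.Chars.isIn_iff_infix _ _).mpr h)
    obtain ⟨m, hm⟩ := this
    rw [List.drop_drop] at hm
    exact ⟨p + m, by omega, hm⟩
  · rintro ⟨k, hk, hpre⟩
    have : sub <+: (l.drop p).drop (k - p) := by
      rw [List.drop_drop, show p + (k - p) = k by omega]
      exact hpre
    exact ((PySem.Chars.isIn_iff_infix _ _).mp
      ((PySem.Chars.exists_prefix_drop_iff_isIn sub (l.drop p)).mp ⟨k - p, this⟩))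

lemma pv_go_eq_scan (l : List Char) (p : Nat) : find_next_w_tr_go l p = pvScan l p := by
  have H : ∀ (m q : Nat), l.length - q ≤ m → find_next_w_tr_go l q = pvScan l q := by
    intro m
    induction m with
    | zero =>
      intro q hq
      rw [find_next_w_tr_go, dif_neg (by omega), pv_scan_ge l q (by omega)]
    | succ m ih =>
      intro q hq
      by_cases hlt : q < l.length
      · rw [find_next_w_tr_go, dif_pos hlt]
        simp only []
        by_cases hj1 : PySem.Chars.findFrom l ("<w:tr".toList) (q : Int) none = -1
        · rw [hj1, if_pos (by norm_num : (-1 : Int) < 0)]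
          have hni := (PySem.Chars.findFrom_natCast_eq_neg_one_iff l ("<w:tr".toList) q (le_of_lt hlt)).mp hj1
          symm
          apply pv_scan_none
          intro k hk
          by_contra hm
          have hpre := pv_match_prefix l k (by revert hm; cases pvMatchAt l k <;> simp)
          exact hni ((pv_infix_iff _ l q).mpr ⟨k, hk, hpre⟩)
        · obtain ⟨hge, hpre, hmin⟩ := PySem.Chars.findFrom_natCast_spec l ("<w:tr".toList) q (le_of_lt hlt) hj1
          set j := PySem.Chars.findFrom l ("<w:tr".toList) (q : Int) none with hjdef
          have hj0 : ¬ j < 0 := by omega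
          rw [if_neg hj0]
          have hskip : pvScan l q = pvScan l j.toNat := by
            rw [show j.toNat = q + (j.toNat - q) by omega]
            apply pv_scan_skip
            intro k hk hk'
            by_contra hm
            exact hmin k hk (by omega) (pv_match_prefix l k (by revert hm; cases pvMatchAt l k <;> simp))
          by_cases hop : is_w_tr_open_at l j.toNat
          · rw [if_pos hop, hskip,
              pv_scan_stop l j.toNat (pv_prefix_lt l j.toNat hpre) (by rw [← pv_open_eq_match]; exact hop)]
            omega
          · rw [if_neg hop, hskip]
            have h5 : pvScan l j.toNat = pvScan l (j.toNat + 5) := by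
              apply pv_scan_skip
              intro k hk hk'
              rcases Nat.lt_or_ge k (j.toNat + 1) with h|h
              · rw [show k = j.toNat by omega, ← pv_open_eq_match]
                simpa using hop
              · rw [show k = j.toNat + (k - j.toNat) by omega]
                exact pv_block l j.toNat hpre (k - j.toNat) (by omega) (by omega)
            rw [h5]
            exact ih (j.toNat + 5) (by omega)
      · rw [find_next_w_tr_go, dif_neg hlt, pv_scan_ge l q (by omega)]
  exact H (l.length - p) p le_rfl

lemma pv_findFrom_clamp (l : List Char) (sub : List Char) (start : Int) :
    PySem.Chars.findFrom l sub start none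
      = PySem.Chars.findFrom l sub ((((max (if start < 0 then (l.length : Int) + start else start) 0).toNat : Nat)) : Int) none := by
  have hc : (((max (if start < 0 then (l.length : Int) + start else start) 0).toNat : Nat) : Int)
      = max (if start < 0 then (l.length : Int) + start else start) 0 :=
    Int.toNat_of_nonneg (le_max_right _ _)
  unfold PySem.Chars.findFrom
  simp only [hc]
  have hst : (if start < 0 then (if start + (l.length : Int) < 0 then 0 else start + l.length) else start)
      = (if (max (if start < 0 then (l.length : Int) + start else start) 0) < 0 then
          (if (max (if start < 0 then (l.length : Int) + start else start) 0) + (l.length : Int) < 0 then 0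
           else (max (if start < 0 then (l.length : Int) + start else start) 0) + l.length)
         else (max (if start < 0 then (l.length : Int) + start else start) 0)) := by
    split_ifs <;> omega
  rw [← hst]

lemma pv_findFrom_ge (l sub : List Char) (hsub : sub ≠ []) (c : Nat) (h : l.length ≤ c) :
    PySem.Chars.findFrom l sub (c : Int) none = -1 := by
  unfold PySem.Chars.findFrom
  simp only []
  rw [if_neg (by omega : ¬ ((c : Int) < 0))]
  by_cases hgt : (l.length : Int) < (c : Int)
  · rw [if_pos hgt]
  · rw [if_neg hgt]
    have hcn : c = l.length := by omega
    have hdrop : List.drop ((c : Int)).toNat (List.take ((l.length : Int)).toNat l) = [] := by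
      rw [hcn]; simp
    rw [hdrop, (PySem.Chars.find_eq_neg_one_iff _ _).mpr (by simp [hsub]), if_pos rfl]

lemma pv_body (l : List Char) (c : Nat) :
    (let j := PySem.Chars.findFrom l ("<w:tr".toList) ((c : Nat) : Int) none
     if j < 0 then (-1 : Int) else if is_w_tr_open_at l j.toNat then j
     else find_next_w_tr_go l (j.toNat + 5))
    = pvScan l c := by
  by_cases hc : c < l.length
  · rw [← pv_go_eq_scan l c]
    conv_rhs => rw [find_next_w_tr_go]
    rw [dif_pos hc]
  · rw [pv_findFrom_ge l ("<w:tr".toList) (by decide) c (Nat.le_of_not_lt hc)]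
    simp only []
    rw [if_pos (by norm_num : (-1 : Int) < 0), pv_scan_ge l c (Nat.le_of_not_lt hc)]

-- ===== VERDICT (by name: the statement is the Claim_ definition above) =====
theorem find_next_w_tr_spec : Claim_equal_find_next_w_tr := by
  unfold Claim_equal_find_next_w_tr Spec_find_next_w_tr
  intro xml start _
  rw [find_next_w_tr, find_next_w_tr_alt]
  simp only []
  set l := xml.toList with hl
  set c : Nat := (max (if start < 0 then (l.length : Int) + start else start) 0).toNat with hcdef
  by_cases hlt : start < (l.length : Int)
  · rw [if_pos hlt, pv_findFrom_clamp, ← hcdef, pv_body]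
  · rw [if_neg hlt]
    have hge : (l.length : Int) ≤ start := not_lt.mp hlt
    have hc : l.length ≤ c := by
      rw [hcdef, if_neg (by omega), max_eq_left (by omega)]
      omega
    rw [pv_scan_ge l c hc]
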